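-- pv_equiv track=rewrite | github.com/TomiksGithub/adk-playground | weatherAgentTeam/agent.py | find_best_windows
-- ===== SOURCE A (Python) =====
-- def find_best_windows(rows: list, min_score: int = 5) -> list:
--     windows, current = [], []
--     for row in rows:
--         if row["score"] >= min_score:
--             current.append(row)
--         elif current:
--             windows.append(current)
--             current = []
--     if current:
--         windows.append(current)
--     return windows
-- ===== SOURCE B (Python) =====
-- def find_best_windows(rows: list, min_score: int = 5) -> list:
--     out = []
--     rest = rows
--     while rest:
--         if rest[0]["score"] >= min_score:
--             k = 1
--             while k < len(rest) and rest[k]["score"] >= min_score: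
--                 k += 1
--             out.append(rest[:k])
--             rest = rest[k:]
--         else:
--             rest = rest[1:]
--     return out
-- ===== Notes on version B (the rewrite author's own statement) =====
-- stated objective: alternative
-- what changed: B replaces A's running 'current' accumulator with trailing flush by a run-segmentation scan: at each hot row it scans ahead to the end of the maximal consecutive hot run and emits that slice at once, so no partial window is ever maintained; Pre_ excludes rows missing the 'score' key, where A raises KeyError.
import Mathlib
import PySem

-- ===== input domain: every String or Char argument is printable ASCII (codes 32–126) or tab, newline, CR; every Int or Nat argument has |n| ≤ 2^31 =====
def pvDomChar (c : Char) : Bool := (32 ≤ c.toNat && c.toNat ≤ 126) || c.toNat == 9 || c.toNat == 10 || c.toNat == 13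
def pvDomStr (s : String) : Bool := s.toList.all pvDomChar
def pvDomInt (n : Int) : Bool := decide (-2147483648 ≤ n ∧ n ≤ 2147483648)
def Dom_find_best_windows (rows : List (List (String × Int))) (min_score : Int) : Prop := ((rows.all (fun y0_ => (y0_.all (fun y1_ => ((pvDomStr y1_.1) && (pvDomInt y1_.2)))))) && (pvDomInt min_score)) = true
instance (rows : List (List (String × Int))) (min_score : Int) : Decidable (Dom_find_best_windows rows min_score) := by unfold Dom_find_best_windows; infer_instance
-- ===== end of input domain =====

-- B is a different decomposition of the same task: it segments rows into maximal consecutive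
-- hot runs by scanning ahead, instead of A's running accumulator with a trailing flush.

-- row["score"]: first-match association-list lookup; on Pre_ the key is always present,
-- so the `.getD 0` default is never consulted.
def pvScore (row : List (String × Int)) : Int :=
  (((row.find? (fun kv => kv.1 == "score")).map (·.2)).getD 0)

-- ===== PORT A =====
-- the for-loop of A over state (windows, current)
def pvALoop (min_score : Int) :
    List (List (String × Int)) →
    (List (List (List (String × Int))) × List (List (String × Int))) →
    (List (List (List (String × Int))) × List (List (String × Int)))
  | [], s => s
  | row :: rest, (windows, current) =>
      if pvScore row ≥ min_score then
        pvALoop min_score rest (windows, current ++ [row])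
      else if current ≠ [] then
        pvALoop min_score rest (windows ++ [current], [])
      else
        pvALoop min_score rest (windows, current)

def find_best_windows (rows : List (List (String × Int))) (min_score : Int) : List (List (List (String × Int))) :=
  let s := pvALoop min_score rows ([], [])
  if s.2 ≠ [] then s.1 ++ [s.2] else s.1

-- ===== PORT B =====
-- inner while: advance k to the end of the maximal hot run
def pvBScan (min_score : Int) (rest : List (List (String × Int))) (k : Nat) : Nat :=
  if _h : k < rest.length ∧ pvScore (rest.getD k []) ≥ min_score then
    pvBScan min_score rest (k + 1)
  else k
termination_by rest.length - k

theorem pvBScan_ge (min_score : Int) (rest : List (List (String × Int))) (k : Nat) :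
    k ≤ pvBScan min_score rest k := by
  unfold pvBScan
  split
  · exact le_trans (Nat.le_succ k) (pvBScan_ge min_score rest (k + 1))
  · exact le_refl k
termination_by rest.length - k

-- outer while over `rest`
def pvBLoop (min_score : Int) (rest : List (List (String × Int)))
    (out : List (List (List (String × Int)))) : List (List (List (String × Int))) :=
  match rest with
  | [] => out
  | r0 :: tl =>
      if pvScore r0 ≥ min_score then
        let k := pvBScan min_score (r0 :: tl) 1
        pvBLoop min_score ((r0 :: tl).drop k) (out ++ [(r0 :: tl).take k])
      else
        pvBLoop min_score tl out
termination_by rest.length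
decreasing_by
  · have h1 : 1 ≤ pvBScan min_score (r0 :: tl) 1 := pvBScan_ge min_score (r0 :: tl) 1
    simp only [List.length_drop]
    simp only [List.length_cons]
    omega
  · simp

def find_best_windows_alt (rows : List (List (String × Int))) (min_score : Int) : List (List (List (String × Int))) :=
  pvBLoop min_score rows []

-- ===== PRECONDITION & SPEC =====
-- Pre_ excludes exactly the inputs where some row lacks the "score" key: there A raises KeyError.
def Pre_find_best_windows (rows : List (List (String × Int))) (min_score : Int) : Prop :=
  (rows.all (fun row => row.any (fun kv => kv.1 == "score"))) = true
instance (rows : List (List (String × Int))) (min_score : Int) : Decidable (Pre_find_best_windows rows min_score) := by unfold Pre_find_best_windows; infer_instance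

def pvWitness_find_best_windows : (List (List (String × Int))) × Int :=
  ([[("score", 7)], [("score", 1)], [("score", 9)]], 5)

def Spec_find_best_windows (rows : List (List (String × Int))) (min_score : Int) (out : List (List (List (String × Int)))) : Prop := out = find_best_windows_alt rows min_score
instance (rows : List (List (String × Int))) (min_score : Int) (out : List (List (List (String × Int)))) : Decidable (Spec_find_best_windows rows min_score out) := by unfold Spec_find_best_windows; infer_instance

-- ===== CLAIM (what is proved, stated in full; the proofs are below) =====
def Claim_equal_find_best_windows : Prop := ∀ (rows : List (List (String × Int))) (min_score : Int), Dom_find_best_windows rows min_score → Pre_find_best_windows rows min_score → Spec_find_best_windows rows min_score (find_best_windows rows min_score)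

-- ===== LEMMAS AND PROOFS =====

-- middle ground between the two ports: grouping with an explicit current window
def pvG (min_score : Int) :
    List (List (String × Int)) → List (List (String × Int)) → List (List (List (String × Int)))
  | c, [] => if c = [] then [] else [c]
  | c, r :: rest =>
      if pvScore r ≥ min_score then pvG min_score (c ++ [r]) rest
      else if c = [] then pvG min_score [] rest
      else c :: pvG min_score [] rest

def pvFinish (s : List (List (List (String × Int))) × List (List (String × Int))) :
    List (List (List (String × Int))) :=
  if s.2 ≠ [] then s.1 ++ [s.2] else s.1

theorem pvALoop_eq_G (min_score : Int) (rows : List (List (String × Int)))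
    (w : List (List (List (String × Int)))) (c : List (List (String × Int))) :
    pvFinish (pvALoop min_score rows (w, c)) = w ++ pvG min_score c rows := by
  induction rows generalizing w c with
  | nil =>
      simp only [pvALoop, pvG, pvFinish]
      by_cases hc : c = [] <;> simp [hc]
  | cons r rest ih =>
      simp only [pvALoop, pvG]
      by_cases hr : pvScore r ≥ min_score
      · simp only [hr, if_pos]
        exact ih w (c ++ [r])
      · simp only [hr, if_neg, not_false_iff]
        by_cases hc : c = []
        · simp [hc, ih]
        · simp only [hc, if_neg, not_false_iff, ne_eq, ite_true]
          rw [ih (w ++ [c]) []]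
          simp

theorem pvG_push (min_score : Int) (tl : List (List (String × Int)))
    (c : List (List (String × Int))) (hc : c ≠ []) :
    pvG min_score c tl =
      (c ++ tl.takeWhile (fun r => pvScore r ≥ min_score)) ::
        pvG min_score [] (tl.dropWhile (fun r => pvScore r ≥ min_score)) := by
  induction tl generalizing c with
  | nil => simp [pvG, hc]
  | cons x t ih =>
      by_cases hx : pvScore x ≥ min_score
      · simp only [pvG, hx, if_pos, List.takeWhile_cons, List.dropWhile_cons,
          decide_eq_true_eq, decide_true]
        rw [ih (c ++ [x]) (by simp)]
        simp [hx]
      · simp only [pvG, hx, if_neg, not_false_iff, hc, ite_true, ite_false,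
          List.takeWhile_cons, List.dropWhile_cons]
        simp [hx, pvG, hc]

theorem pvBScan_char (min_score : Int) (rest : List (List (String × Int))) (k : Nat) :
    pvBScan min_score rest k = k + ((rest.drop k).takeWhile (fun r => pvScore r ≥ min_score)).length := by
  unfold pvBScan
  split
  · rename_i h
    obtain ⟨hk, hs⟩ := h
    rw [pvBScan_char min_score rest (k + 1)]
    have hd : rest.drop k = rest[k] :: rest.drop (k + 1) := List.drop_eq_getElem_cons hk
    have hg : rest.getD k [] = rest[k] := by
      simp [List.getD, List.getElem?_eq_getElem hk]
    rw [hd, List.takeWhile_cons]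
    rw [hg] at hs
    simp [hs]
    omega
  · rename_i h
    push_neg at h
    by_cases hk : k < rest.length
    · have hs := h hk
      have hd : rest.drop k = rest[k] :: rest.drop (k + 1) := List.drop_eq_getElem_cons hk
      have hg : rest.getD k [] = rest[k] := by
        simp [List.getD, List.getElem?_eq_getElem hk]
      rw [hg] at hs
      rw [hd, List.takeWhile_cons]
      simp [hs]
    · have : rest.drop k = [] := List.drop_eq_nil_of_le (by omega)
      simp [this]
termination_by rest.length - k

theorem pvTake_takeWhile {α : Type} (p : α → Bool) (l : List α) :
    l.take (l.takeWhile p).length = l.takeWhile p := by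
  induction l with
  | nil => simp
  | cons x t ih =>
      by_cases hx : p x
      · simp [List.takeWhile_cons, hx, ih]
      · simp [List.takeWhile_cons, hx]

theorem pvDrop_takeWhile {α : Type} (p : α → Bool) (l : List α) :
    l.drop (l.takeWhile p).length = l.dropWhile p := by
  induction l with
  | nil => simp
  | cons x t ih =>
      by_cases hx : p x
      · simp [List.takeWhile_cons, List.dropWhile_cons, hx, ih]
      · simp [List.takeWhile_cons, List.dropWhile_cons, hx]

theorem pvBLoop_eq_G (min_score : Int) (rest : List (List (String × Int)))
    (out : List (List (List (String × Int)))) :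
    pvBLoop min_score rest out = out ++ pvG min_score [] rest := by
  induction hn : rest.length using Nat.strong_induction_on generalizing rest out with
  | _ n ih =>
  match rest, hn with
  | [], _ => simp [pvBLoop, pvG]
  | r0 :: tl, hn =>
    by_cases hr : pvScore r0 ≥ min_score
    · simp only [pvBLoop, hr, if_pos]
      have hscan : pvBScan min_score (r0 :: tl) 1 =
          1 + (tl.takeWhile (fun r => pvScore r ≥ min_score)).length := by
        rw [pvBScan_char]; simp
      set tw := tl.takeWhile (fun r => pvScore r ≥ min_score) with htw
      have htake : (r0 :: tl).take (pvBScan min_score (r0 :: tl) 1) = r0 :: tw := by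
        rw [hscan]
        simp only [List.take_succ_cons, Nat.add_comm 1 tw.length]
        rw [htw, pvTake_takeWhile]
      have hdrop : (r0 :: tl).drop (pvBScan min_score (r0 :: tl) 1) =
          tl.dropWhile (fun r => pvScore r ≥ min_score) := by
        rw [hscan]
        simp only [Nat.add_comm 1 tw.length, List.drop_succ_cons]
        rw [htw, pvDrop_takeWhile]
      rw [htake, hdrop]
      have hlt : (tl.dropWhile (fun r => pvScore r ≥ min_score)).length < n := by
        have := List.length_dropWhile_le (fun r => pvScore r ≥ min_score) tl
        simp only [List.length_cons] at hn
        omega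
      rw [ih _ hlt _ _ rfl]
      have hG : pvG min_score [] (r0 :: tl) =
          (r0 :: tw) :: pvG min_score [] (tl.dropWhile (fun r => pvScore r ≥ min_score)) := by
        simp only [pvG, hr, if_pos, List.nil_append]
        rw [pvG_push min_score tl [r0] (by simp)]
        simp [htw]
      rw [hG]
      simp
    · simp only [pvBLoop, hr, if_neg, not_false_iff]
      have hlt : tl.length < n := by simp only [List.length_cons] at hn; omega
      rw [ih _ hlt _ _ rfl]
      simp [pvG, hr]

-- ===== VERDICT (by name: the statement is the Claim_ definition above) =====
theorem find_best_windows_spec : Claim_equal_find_best_windows := by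
  intro rows min_score _hdom _hpre
  show find_best_windows rows min_score = find_best_windows_alt rows min_score
  unfold find_best_windows find_best_windows_alt
  have hA := pvALoop_eq_G min_score rows [] []
  have hB := pvBLoop_eq_G min_score rows []
  simp only [pvFinish] at hA
  simp only [List.nil_append] at hA hB
  rw [hB, ← hA]
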